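-- pv_equiv track=rewrite | github.com/ManuShamil/dayz-server-startup-script | dayz_server_manager.py | _extract_failure_reason
-- ===== SOURCE A (Python) =====
-- from typing import Iterable, Optional
--
-- LOGIN_FAILURE_MARKERS = (
--     "login failure",
--     "failed to login",
--     "invalid password",
--     "account logon denied",
--     "two-factor code mismatch",
-- )
--
-- def _extract_failure_reason(lines: Iterable[str]) -> Optional[str]:
--     for line in reversed(list(lines)):
--         normalized = line.strip()
--         lowered = normalized.lower()
--         if any(marker in lowered for marker in LOGIN_FAILURE_MARKERS):
--             return normalized
--         if "error" in lowered or "failed" in lowered: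
--             return normalized
--     return None
-- ===== SOURCE B (Python) =====
-- from typing import Iterable, Optional
--
-- LOGIN_FAILURE_MARKERS = (
--     "login failure",
--     "failed to login",
--     "invalid password",
--     "account logon denied",
--     "two-factor code mismatch",
-- )
--
-- def _extract_failure_reason(lines: Iterable[str]) -> Optional[str]:
--     result = None
--     for line in lines:
--         normalized = line.strip()
--         lowered = normalized.lower()
--         if (any(marker in lowered for marker in LOGIN_FAILURE_MARKERS)
--                 or "error" in lowered or "failed" in lowered):
--             result = normalized
--     return result
-- ===== Notes on version B (the rewrite author's own statement) =====
-- stated objective: simpler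
-- what changed: Replaces the reversed-list materialization with early return by a single forward streaming pass that overwrites a last-match accumulator and returns it after the loop.
import Mathlib
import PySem

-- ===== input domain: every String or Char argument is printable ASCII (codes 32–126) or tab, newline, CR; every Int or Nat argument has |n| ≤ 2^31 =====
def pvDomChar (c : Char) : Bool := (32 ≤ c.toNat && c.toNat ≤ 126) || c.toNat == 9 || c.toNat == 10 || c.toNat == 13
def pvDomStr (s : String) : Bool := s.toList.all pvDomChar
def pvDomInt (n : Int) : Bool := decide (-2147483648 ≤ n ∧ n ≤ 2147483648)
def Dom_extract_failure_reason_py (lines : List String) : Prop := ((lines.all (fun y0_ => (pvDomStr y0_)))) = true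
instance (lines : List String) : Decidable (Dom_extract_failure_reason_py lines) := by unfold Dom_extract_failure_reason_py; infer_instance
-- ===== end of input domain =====

-- B replaces A's reversed-scan-with-early-return by a single forward pass that overwrites a
-- last-match accumulator (objective: simpler decomposition, same O(n) cost).


-- ===== PORT A =====
def pvLoginFailureMarkers : List String :=
  ["login failure", "failed to login", "invalid password",
   "account logon denied", "two-factor code mismatch"]

-- A's loop over reversed(list(lines)), returning at the first match
def extractFailureGoA : List String → Option String
  | [] => none
  | line :: rest =>
    let normalized := PySem.Str.strip line
    let lowered := PySem.Str.lower normalized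
    if pvLoginFailureMarkers.any (fun marker => PySem.Str.isIn marker lowered) then
      some normalized
    else if PySem.Str.isIn "error" lowered || PySem.Str.isIn "failed" lowered then
      some normalized
    else
      extractFailureGoA rest

def extract_failure_reason_py (lines : List String) : Option String :=
  extractFailureGoA lines.reverse

-- ===== PORT B =====
def extract_failure_reason_py_alt (lines : List String) : Option String :=
  lines.foldl (fun result line =>
    let normalized := PySem.Str.strip line
    let lowered := PySem.Str.lower normalized
    if pvLoginFailureMarkers.any (fun marker => PySem.Str.isIn marker lowered)
        || PySem.Str.isIn "error" lowered || PySem.Str.isIn "failed" lowered then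
      some normalized
    else result) none

-- ===== PRECONDITION & SPEC =====
def Spec_extract_failure_reason_py (lines : List String) (out : Option String) : Prop := out = extract_failure_reason_py_alt lines
instance (lines : List String) (out : Option String) : Decidable (Spec_extract_failure_reason_py lines out) := by unfold Spec_extract_failure_reason_py; infer_instance

-- ===== CLAIM (what is proved, stated in full; the proofs are below) =====
def Claim_equal_extract_failure_reason_py : Prop := ∀ (lines : List String), Dom_extract_failure_reason_py lines → Spec_extract_failure_reason_py lines (extract_failure_reason_py lines)

-- ===== LEMMAS AND PROOFS =====

theorem extractFailureGoA_append (ys zs : List String) :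
    extractFailureGoA (ys ++ zs) =
      match extractFailureGoA ys with
      | some v => some v
      | none => extractFailureGoA zs := by
  induction ys with
  | nil => simp [extractFailureGoA]
  | cons y ys ih =>
    simp only [List.cons_append, extractFailureGoA]
    split_ifs <;> simp [ih]

theorem foldl_eq_goA_reverse (xs : List String) (acc : Option String) :
    xs.foldl (fun result line =>
      let normalized := PySem.Str.strip line
      let lowered := PySem.Str.lower normalized
      if pvLoginFailureMarkers.any (fun marker => PySem.Str.isIn marker lowered)
          || PySem.Str.isIn "error" lowered || PySem.Str.isIn "failed" lowered then
        some normalized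
      else result) acc =
      match extractFailureGoA xs.reverse with
      | some v => some v
      | none => acc := by
  induction xs generalizing acc with
  | nil => simp [extractFailureGoA]
  | cons x xs ih =>
    simp only [List.foldl_cons, List.reverse_cons, extractFailureGoA_append, ih]
    cases h : extractFailureGoA xs.reverse with
    | some v => simp
    | none =>
      cases ha : pvLoginFailureMarkers.any
          (fun marker => PySem.Str.isIn marker (PySem.Str.lower (PySem.Str.strip x))) <;>
        cases hb : PySem.Str.isIn "error" (PySem.Str.lower (PySem.Str.strip x)) <;>
        cases hc : PySem.Str.isIn "failed" (PySem.Str.lower (PySem.Str.strip x)) <;>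
        simp_all [extractFailureGoA]
      rw [if_neg]
      push_neg
      intro m hm
      simp [ha m hm]

-- ===== VERDICT (by name: the statement is the Claim_ definition above) =====
theorem extract_failure_reason_py_spec : Claim_equal_extract_failure_reason_py := by
  intro lines _
  unfold Spec_extract_failure_reason_py extract_failure_reason_py extract_failure_reason_py_alt
  rw [foldl_eq_goA_reverse]
  cases extractFailureGoA lines.reverse <;> rfl
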